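-- pv_equiv track=rewrite | github.com/fenghaitao/simics-7-packages-2025-38-linux64 | simics-7.57.0/linux64/lib/python-py3/profile_commands.py | pow2_bytes_to_str
-- ===== SOURCE A (Python) =====
-- def pow2_bytes_to_str(n):
--     orig_n = n
--     if n < 10:
--         return "%d byte%s" % (1 << n, ["s", ""][n == 0])
--     for prefix in ["kilo", "Mega", "Giga", "Tera", "Peta", "Exa"]:
--         n -= 10
--         if n < 10:
--             return "%d %sbyte%s" % (1 << n, prefix, ["s", ""][n == 0])
--     return "2^%d bytes" % orig_n
-- ===== SOURCE B (Python) =====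
-- def pow2_bytes_to_str(n):
--     if n < 10:
--         return "%d byte%s" % (1 << n, "" if n == 0 else "s")
--     idx, rem = divmod(n, 10)
--     if idx <= 6:
--         prefixes = ["kilo", "Mega", "Giga", "Tera", "Peta", "Exa"]
--         return "%d %sbyte%s" % (1 << rem, prefixes[idx - 1], "" if rem == 0 else "s")
--     return "2^%d bytes" % n
-- ===== Notes on version B (the rewrite author's own statement) =====
-- stated objective: simpler
-- what changed: Replaces the six-iteration prefix-scanning subtraction loop with direct divmod arithmetic: the prefix slot is n // 10 and the mantissa exponent n % 10, read out of the prefix list by index.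
import Mathlib
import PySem

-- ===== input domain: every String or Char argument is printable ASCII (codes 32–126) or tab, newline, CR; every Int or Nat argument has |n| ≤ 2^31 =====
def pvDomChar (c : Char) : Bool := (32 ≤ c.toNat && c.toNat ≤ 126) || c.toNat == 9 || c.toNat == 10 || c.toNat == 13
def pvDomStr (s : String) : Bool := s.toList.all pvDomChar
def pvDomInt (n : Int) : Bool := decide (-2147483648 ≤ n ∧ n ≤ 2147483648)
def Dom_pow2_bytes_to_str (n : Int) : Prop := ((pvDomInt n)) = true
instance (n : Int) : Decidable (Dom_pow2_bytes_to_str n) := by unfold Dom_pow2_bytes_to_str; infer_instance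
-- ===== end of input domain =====

-- B replaces A's six-iteration prefix-subtraction loop by direct divmod arithmetic (simpler decomposition, same O(1) cost).

-- ===== PORT A =====
-- A's for-loop over the prefix list with early return, state n carried through the steps
def pow2A_loop (prefixes : List String) (n : Int) : Option String :=
  match prefixes with
  | [] => none
  | p :: ps =>
    let n' := n - 10
    if n' < 10 then
      some (PySem.Int.toStr ((2:Int) ^ n'.toNat) ++ " " ++ p ++ "byte" ++ (if n' = 0 then "" else "s"))
    else pow2A_loop ps n'

def pow2_bytes_to_str (n : Int) : String :=
  if n < 10 then
    PySem.Int.toStr ((2:Int) ^ n.toNat) ++ " byte" ++ (if n = 0 then "" else "s")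
  else
    match pow2A_loop ["kilo", "Mega", "Giga", "Tera", "Peta", "Exa"] n with
    | some s => s
    | none => "2^" ++ PySem.Int.toStr n ++ " bytes"

-- ===== PORT B =====
def pow2_bytes_to_str_alt (n : Int) : String :=
  if n < 10 then
    PySem.Int.toStr ((2:Int) ^ n.toNat) ++ " byte" ++ (if n = 0 then "" else "s")
  else
    let idx := PySem.Int.floordiv n 10
    let rem := PySem.Int.mod n 10
    if idx ≤ 6 then
      let prefixes := ["kilo", "Mega", "Giga", "Tera", "Peta", "Exa"]
      PySem.Int.toStr ((2:Int) ^ rem.toNat) ++ " " ++ ((PySem.List.pyGet? prefixes (idx - 1)).getD "") ++ "byte" ++ (if rem = 0 then "" else "s")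
    else "2^" ++ PySem.Int.toStr n ++ " bytes"

-- ===== PRECONDITION & SPEC =====
-- Pre_ excludes n < 0, where Python's 1 << n raises ValueError in both A and B.
def Pre_pow2_bytes_to_str (n : Int) : Prop := 0 ≤ n
instance (n : Int) : Decidable (Pre_pow2_bytes_to_str n) := by unfold Pre_pow2_bytes_to_str; infer_instance
def pvWitness_pow2_bytes_to_str : Int := (25)

def Spec_pow2_bytes_to_str (n : Int) (out : String) : Prop := out = pow2_bytes_to_str_alt n
instance (n : Int) (out : String) : Decidable (Spec_pow2_bytes_to_str n out) := by unfold Spec_pow2_bytes_to_str; infer_instance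

-- ===== CLAIM =====
def Claim_equal_pow2_bytes_to_str : Prop := ∀ (n : Int), Dom_pow2_bytes_to_str n → Pre_pow2_bytes_to_str n → Spec_pow2_bytes_to_str n (pow2_bytes_to_str n)

-- ===== LEMMAS AND PROOFS =====

theorem pow2A_loop_cons (p : String) (ps : List String) (n : Int) :
    pow2A_loop (p :: ps) n =
      if n - 10 < 10 then
        some (PySem.Int.toStr ((2:Int) ^ (n - 10).toNat) ++ " " ++ p ++ "byte" ++ (if n - 10 = 0 then "" else "s"))
      else pow2A_loop ps (n - 10) := rfl

-- For n ≥ 70 the loop never fires and both return the fallback string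
theorem pow2A_loop_none (n : Int) (h : 70 ≤ n) :
    pow2A_loop ["kilo", "Mega", "Giga", "Tera", "Peta", "Exa"] n = none := by
  rw [pow2A_loop_cons, if_neg (by omega), pow2A_loop_cons, if_neg (by omega),
      pow2A_loop_cons, if_neg (by omega), pow2A_loop_cons, if_neg (by omega),
      pow2A_loop_cons, if_neg (by omega), pow2A_loop_cons, if_neg (by omega)]; rfl

theorem agree_big (n : Int) (h : 70 ≤ n) :
    pow2_bytes_to_str n = pow2_bytes_to_str_alt n := by
  unfold pow2_bytes_to_str pow2_bytes_to_str_alt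
  rw [if_neg (by omega), if_neg (by omega), pow2A_loop_none n h]
  have hq : ¬ PySem.Int.floordiv n 10 ≤ 6 := by
    rw [PySem.Int.floordiv_eq_ediv_of_pos (by omega)]; omega
  rw [if_neg hq]

theorem mid1 (n : Int) (h1 : 10 ≤ n) (h2 : n < 20) :
    pow2_bytes_to_str n = pow2_bytes_to_str_alt n := by
  have hfd : PySem.Int.floordiv n 10 = 1 := by
    rw [PySem.Int.floordiv_eq_ediv_of_pos (by omega)]; omega
  have hmd : PySem.Int.mod n 10 = n - 10 := by
    rw [PySem.Int.mod_eq_emod_of_pos (by omega)]; omega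
  have hp : (PySem.List.pyGet? ["kilo", "Mega", "Giga", "Tera", "Peta", "Exa"] ((1:Int) - 1)).getD "" = "kilo" := by decide
  unfold pow2_bytes_to_str pow2_bytes_to_str_alt
  rw [if_neg (by omega), if_neg (by omega), pow2A_loop_cons, if_pos (by omega)]
  simp only [hfd, hmd]
  rw [if_pos (show ((1:Int)) ≤ 6 by norm_num), hp]

theorem mid2 (n : Int) (h1 : 20 ≤ n) (h2 : n < 30) :
    pow2_bytes_to_str n = pow2_bytes_to_str_alt n := by
  have hfd : PySem.Int.floordiv n 10 = 2 := by
    rw [PySem.Int.floordiv_eq_ediv_of_pos (by omega)]; omega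
  have hmd : PySem.Int.mod n 10 = n - 20 := by
    rw [PySem.Int.mod_eq_emod_of_pos (by omega)]; omega
  have hs : n - 10 - 10 = n - 20 := by ring
  have hp : (PySem.List.pyGet? ["kilo", "Mega", "Giga", "Tera", "Peta", "Exa"] ((2:Int) - 1)).getD "" = "Mega" := by decide
  unfold pow2_bytes_to_str pow2_bytes_to_str_alt
  rw [if_neg (by omega), if_neg (by omega), pow2A_loop_cons, if_neg (by omega), pow2A_loop_cons, if_pos (by omega)]
  simp only [hfd, hmd, hs]
  rw [if_pos (show ((2:Int)) ≤ 6 by norm_num), hp]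

theorem mid3 (n : Int) (h1 : 30 ≤ n) (h2 : n < 40) :
    pow2_bytes_to_str n = pow2_bytes_to_str_alt n := by
  have hfd : PySem.Int.floordiv n 10 = 3 := by
    rw [PySem.Int.floordiv_eq_ediv_of_pos (by omega)]; omega
  have hmd : PySem.Int.mod n 10 = n - 30 := by
    rw [PySem.Int.mod_eq_emod_of_pos (by omega)]; omega
  have hs : n - 10 - 10 - 10 = n - 30 := by ring
  have hp : (PySem.List.pyGet? ["kilo", "Mega", "Giga", "Tera", "Peta", "Exa"] ((3:Int) - 1)).getD "" = "Giga" := by decide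
  unfold pow2_bytes_to_str pow2_bytes_to_str_alt
  rw [if_neg (by omega), if_neg (by omega), pow2A_loop_cons, if_neg (by omega), pow2A_loop_cons, if_neg (by omega), pow2A_loop_cons, if_pos (by omega)]
  simp only [hfd, hmd, hs]
  rw [if_pos (show ((3:Int)) ≤ 6 by norm_num), hp]

theorem mid4 (n : Int) (h1 : 40 ≤ n) (h2 : n < 50) :
    pow2_bytes_to_str n = pow2_bytes_to_str_alt n := by
  have hfd : PySem.Int.floordiv n 10 = 4 := by
    rw [PySem.Int.floordiv_eq_ediv_of_pos (by omega)]; omega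
  have hmd : PySem.Int.mod n 10 = n - 40 := by
    rw [PySem.Int.mod_eq_emod_of_pos (by omega)]; omega
  have hs : n - 10 - 10 - 10 - 10 = n - 40 := by ring
  have hp : (PySem.List.pyGet? ["kilo", "Mega", "Giga", "Tera", "Peta", "Exa"] ((4:Int) - 1)).getD "" = "Tera" := by decide
  unfold pow2_bytes_to_str pow2_bytes_to_str_alt
  rw [if_neg (by omega), if_neg (by omega), pow2A_loop_cons, if_neg (by omega), pow2A_loop_cons, if_neg (by omega), pow2A_loop_cons, if_neg (by omega), pow2A_loop_cons, if_pos (by omega)]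
  simp only [hfd, hmd, hs]
  rw [if_pos (show ((4:Int)) ≤ 6 by norm_num), hp]

theorem mid5 (n : Int) (h1 : 50 ≤ n) (h2 : n < 60) :
    pow2_bytes_to_str n = pow2_bytes_to_str_alt n := by
  have hfd : PySem.Int.floordiv n 10 = 5 := by
    rw [PySem.Int.floordiv_eq_ediv_of_pos (by omega)]; omega
  have hmd : PySem.Int.mod n 10 = n - 50 := by
    rw [PySem.Int.mod_eq_emod_of_pos (by omega)]; omega
  have hs : n - 10 - 10 - 10 - 10 - 10 = n - 50 := by ring
  have hp : (PySem.List.pyGet? ["kilo", "Mega", "Giga", "Tera", "Peta", "Exa"] ((5:Int) - 1)).getD "" = "Peta" := by decide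
  unfold pow2_bytes_to_str pow2_bytes_to_str_alt
  rw [if_neg (by omega), if_neg (by omega), pow2A_loop_cons, if_neg (by omega), pow2A_loop_cons, if_neg (by omega), pow2A_loop_cons, if_neg (by omega), pow2A_loop_cons, if_neg (by omega), pow2A_loop_cons, if_pos (by omega)]
  simp only [hfd, hmd, hs]
  rw [if_pos (show ((5:Int)) ≤ 6 by norm_num), hp]

theorem mid6 (n : Int) (h1 : 60 ≤ n) (h2 : n < 70) :
    pow2_bytes_to_str n = pow2_bytes_to_str_alt n := by
  have hfd : PySem.Int.floordiv n 10 = 6 := by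
    rw [PySem.Int.floordiv_eq_ediv_of_pos (by omega)]; omega
  have hmd : PySem.Int.mod n 10 = n - 60 := by
    rw [PySem.Int.mod_eq_emod_of_pos (by omega)]; omega
  have hs : n - 10 - 10 - 10 - 10 - 10 - 10 = n - 60 := by ring
  have hp : (PySem.List.pyGet? ["kilo", "Mega", "Giga", "Tera", "Peta", "Exa"] ((6:Int) - 1)).getD "" = "Exa" := by decide
  unfold pow2_bytes_to_str pow2_bytes_to_str_alt
  rw [if_neg (by omega), if_neg (by omega), pow2A_loop_cons, if_neg (by omega), pow2A_loop_cons, if_neg (by omega), pow2A_loop_cons, if_neg (by omega), pow2A_loop_cons, if_neg (by omega), pow2A_loop_cons, if_neg (by omega), pow2A_loop_cons, if_pos (by omega)]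
  simp only [hfd, hmd, hs]
  rw [if_pos (show ((6:Int)) ≤ 6 by norm_num), hp]

-- ===== VERDICT =====
theorem pow2_bytes_to_str_spec : Claim_equal_pow2_bytes_to_str := by
  intro n _ hpre
  unfold Spec_pow2_bytes_to_str
  by_cases hlt : n < 10
  · unfold pow2_bytes_to_str pow2_bytes_to_str_alt
    rw [if_pos hlt, if_pos hlt]
  · by_cases h1 : n < 20
    · exact mid1 n (by omega) h1
    · by_cases h2 : n < 30
      · exact mid2 n (by omega) h2
      · by_cases h3 : n < 40
        · exact mid3 n (by omega) h3
        · by_cases h4 : n < 50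
          · exact mid4 n (by omega) h4
          · by_cases h5 : n < 60
            · exact mid5 n (by omega) h5
            · by_cases h6 : n < 70
              · exact mid6 n (by omega) h6
              · exact agree_big n (by omega)
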